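-- pv_equiv track=rewrite | github.com/GreenWaves-Technologies/gap_sdk | tools/nntool/graph/manipulations/eliminate_transposes/eliminate_transposes.py | strip_leading_ones
-- ===== SOURCE A (Python) =====
-- def strip_leading_ones(shape, in_len):
--     res = []
--     seen_dim = False
--     for dim in shape:
--         if seen_dim:
--             res.append(dim)
--         elif dim != 1:
--             res.append(dim)
--             seen_dim = True
--     return res
-- ===== SOURCE B (Python) =====
-- def strip_leading_ones(shape, in_len):
--     for i, dim in enumerate(shape):
--         if dim != 1:
--             return list(shape[i:])
--     return []
-- ===== Notes on version B (the rewrite author's own statement) =====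
-- stated objective: simpler
-- what changed: Replaces the flag-driven append loop with an early-return scan: find the first dim != 1 and return the slice of shape from there ([] if none).
import Mathlib
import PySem

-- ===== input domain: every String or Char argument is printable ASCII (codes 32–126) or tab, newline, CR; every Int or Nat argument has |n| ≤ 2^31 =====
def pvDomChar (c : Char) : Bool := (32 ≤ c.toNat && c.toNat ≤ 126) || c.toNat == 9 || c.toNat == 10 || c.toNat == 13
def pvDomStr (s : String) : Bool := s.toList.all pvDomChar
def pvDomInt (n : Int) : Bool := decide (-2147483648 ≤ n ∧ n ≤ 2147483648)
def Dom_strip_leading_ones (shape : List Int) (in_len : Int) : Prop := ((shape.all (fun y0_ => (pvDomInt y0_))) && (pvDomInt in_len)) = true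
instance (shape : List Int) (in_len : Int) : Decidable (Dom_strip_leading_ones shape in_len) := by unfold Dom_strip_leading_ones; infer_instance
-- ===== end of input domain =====

-- ===== PORT A =====
-- A: flag-driven loop; folds over shape keeping (res, seen_dim).
def strip_leading_ones (shape : List Int) (in_len : Int) : List Int :=
  (shape.foldl (fun (st : List Int × Bool) dim =>
      if st.2 then (st.1 ++ [dim], st.2)
      else if dim ≠ 1 then (st.1 ++ [dim], true)
      else st) ([], false)).1

-- ===== PORT B =====
-- B: scan for the first dim ≠ 1 and return the suffix from there; [] if none.
def strip_leading_ones_alt (shape : List Int) (in_len : Int) : List Int :=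
  match shape with
  | [] => []
  | dim :: rest => if dim ≠ 1 then dim :: rest else strip_leading_ones_alt rest in_len

-- ===== PRECONDITION & SPEC =====
def Spec_strip_leading_ones (shape : List Int) (in_len : Int) (out : List Int) : Prop := out = strip_leading_ones_alt shape in_len
instance (shape : List Int) (in_len : Int) (out : List Int) : Decidable (Spec_strip_leading_ones shape in_len out) := by unfold Spec_strip_leading_ones; infer_instance

-- ===== CLAIM (what is proved, stated in full; the proofs are below) =====
def Claim_equal_strip_leading_ones : Prop := ∀ (shape : List Int) (in_len : Int), Dom_strip_leading_ones shape in_len → Spec_strip_leading_ones shape in_len (strip_leading_ones shape in_len)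

-- ===== LEMMAS AND PROOFS =====
theorem pv_foldl_seen (shape res : List Int) :
    (shape.foldl (fun (st : List Int × Bool) dim =>
      if st.2 then (st.1 ++ [dim], st.2)
      else if dim ≠ 1 then (st.1 ++ [dim], true)
      else st) (res, true)) = (res ++ shape, true) := by
  induction shape generalizing res with
  | nil => simp
  | cons d t ih =>
    rw [List.foldl_cons]
    show List.foldl _ (res ++ [d], true) t = _
    rw [ih]; simp

theorem pv_foldl_unseen (shape res : List Int) (in_len : Int) :
    (shape.foldl (fun (st : List Int × Bool) dim =>
      if st.2 then (st.1 ++ [dim], st.2)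
      else if dim ≠ 1 then (st.1 ++ [dim], true)
      else st) (res, false)).1 = res ++ strip_leading_ones_alt shape in_len := by
  induction shape generalizing res with
  | nil => simp [strip_leading_ones_alt]
  | cons d t ih =>
    by_cases h : d = 1
    · subst h
      rw [List.foldl_cons]
      exact ih res
    · rw [List.foldl_cons]
      have hstep : (if (res, false).2 = true then ((res, false).1 ++ [d], (res, false).2)
          else if d ≠ 1 then ((res, false).1 ++ [d], true) else (res, false)) = (res ++ [d], true) := by
        simp [h]
      rw [hstep, pv_foldl_seen]
      simp [strip_leading_ones_alt, h]

-- ===== VERDICT (by name: the statement is the Claim_ definition above) =====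
theorem strip_leading_ones_spec : Claim_equal_strip_leading_ones := by
  intro shape in_len _
  show _ = _
  simpa [strip_leading_ones] using pv_foldl_unseen shape [] in_len
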